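-- pv_equiv track=rewrite | github.com/wasiahmad/AVATAR | evaluation/CodeBLEU/calc_code_bleu.py | php_process
-- ===== SOURCE A (Python) =====
-- def php_process(tokens):
--     new_tokens = []
--     num_tokens = len(tokens)
--     tidx = 0
--     while tidx < num_tokens:
--         tok = tokens[tidx]
--         tok = tok.strip()
--         if tok == "$":
--             if tidx + 1 < num_tokens:
--                 tok += tokens[tidx + 1].strip()
--                 tidx += 1
--                 pass
--             pass
--         tidx += 1
--         new_tokens.append(tok)
--     return new_tokens
-- ===== SOURCE B (Python) =====
-- def php_process(tokens):
--     new_tokens = []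
--     merge_pending = False
--     for tok in tokens:
--         tok = tok.strip()
--         if merge_pending:
--             new_tokens[-1] += tok
--             merge_pending = False
--         else:
--             new_tokens.append(tok)
--             if tok == "$":
--                 merge_pending = True
--     return new_tokens
-- ===== Notes on version B (the rewrite author's own statement) =====
-- stated objective: simpler
-- what changed: Replaced A's index-driven while loop with lookahead tokens[tidx+1] and index-skip by a single forward for-loop over the tokens keeping a merge_pending flag that appends the current stripped token onto the previous output entry.
import Mathlib
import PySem

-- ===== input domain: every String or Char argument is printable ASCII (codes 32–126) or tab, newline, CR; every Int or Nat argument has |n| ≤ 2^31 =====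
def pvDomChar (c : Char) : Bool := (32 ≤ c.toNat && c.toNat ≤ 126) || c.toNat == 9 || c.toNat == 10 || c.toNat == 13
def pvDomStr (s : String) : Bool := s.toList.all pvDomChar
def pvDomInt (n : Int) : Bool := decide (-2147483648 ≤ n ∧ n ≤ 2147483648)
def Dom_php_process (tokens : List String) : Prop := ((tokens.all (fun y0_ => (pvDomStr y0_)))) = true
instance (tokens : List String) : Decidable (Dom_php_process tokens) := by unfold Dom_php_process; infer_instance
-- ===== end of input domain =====

-- B replaces A's index-with-lookahead-and-skip loop by a single forward pass with a
-- 'merge pending' flag that attaches the current token onto the previous output entry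
-- (objective: simpler decomposition, same O(n) cost).

-- ===== PORT A =====
-- A's while-loop over tidx with lookahead tokens[tidx+1] and skip, as structural
-- recursion on the remaining suffix (tidx+1 < num_tokens ⟺ the suffix is nonempty).
def php_process_loop (rest : List String) : List String :=
  match rest with
  | [] => []
  | t :: rest' =>
    let tok := PySem.Str.strip t
    if tok == "$" then
      match rest' with
      | [] => [tok]
      | u :: rest'' => (tok ++ PySem.Str.strip u) :: php_process_loop rest''
    else tok :: php_process_loop rest'

def php_process (tokens : List String) : List String := php_process_loop tokens

-- ===== PORT B =====
-- state: (new_tokens in reverse, merge_pending flag)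
def php_process_alt_step (st : List String × Bool) (t : String) : List String × Bool :=
  let tok := PySem.Str.strip t
  if st.2 then
    match st.1 with
    | [] => ([tok], false)   -- unreachable: pending implies nonempty accumulator
    | h :: tl => ((h ++ tok) :: tl, false)
  else (tok :: st.1, tok == "$")

def php_process_alt (tokens : List String) : List String :=
  (tokens.foldl php_process_alt_step ([], false)).1.reverse

-- ===== PRECONDITION & SPEC =====
def Spec_php_process (tokens : List String) (out : List String) : Prop := out = php_process_alt tokens
instance (tokens : List String) (out : List String) : Decidable (Spec_php_process tokens out) := by unfold Spec_php_process; infer_instance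

-- ===== CLAIM (what is proved, stated in full; the proofs are below) =====
def Claim_equal_php_process : Prop := ∀ (tokens : List String), Dom_php_process tokens → Spec_php_process tokens (php_process tokens)

-- ===== LEMMAS AND PROOFS =====
def phpMerge (h : String) (rest : List String) : List String :=
  match rest with
  | [] => [h]
  | u :: r => (h ++ PySem.Str.strip u) :: php_process_loop r

theorem php_process_alt_loop (tokens : List String) :
    (∀ acc : List String,
      (tokens.foldl php_process_alt_step (acc, false)).1.reverse
        = acc.reverse ++ php_process_loop tokens)
    ∧ (∀ (acc : List String) (h : String),
      (tokens.foldl php_process_alt_step (h :: acc, true)).1.reverse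
        = acc.reverse ++ phpMerge h tokens) := by
  induction tokens with
  | nil =>
    constructor
    · intro acc; simp [php_process_loop]
    · intro acc h; simp [phpMerge]
  | cons t rest ih =>
    constructor
    · intro acc
      by_cases h : PySem.Str.strip t = "$"
      · have : php_process_loop (t :: rest) = phpMerge "$" rest := by
          cases rest <;> simp [php_process_loop, phpMerge, h]
        rw [this]
        simp only [List.foldl, php_process_alt_step]
        rw [if_neg (by simp), h]
        simpa using ih.2 acc "$"
      · simp only [List.foldl, php_process_alt_step]
        rw [if_neg (by simp), beq_eq_false_iff_ne.mpr h]
        rw [ih.1 (PySem.Str.strip t :: acc)]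
        have h2 : php_process_loop (t :: rest)
            = PySem.Str.strip t :: php_process_loop rest := by
          cases rest <;> simp [php_process_loop, h]
        rw [h2]; simp
    · intro acc h
      simp only [List.foldl, php_process_alt_step, if_pos]
      rw [ih.1 ((h ++ PySem.Str.strip t) :: acc)]
      simp [phpMerge]

-- ===== VERDICT (by name: the statement is the Claim_ definition above) =====
theorem php_process_spec : Claim_equal_php_process := by
  intro tokens _
  unfold Spec_php_process php_process php_process_alt
  rw [(php_process_alt_loop tokens).1 []]
  simp
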